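-- pv_equiv track=rewrite | github.com/Adasiak/SPD | Jackson/9.py | jackson
-- ===== SOURCE A (Python) =====
-- def Cmax(permutation, tasks):
--     n = len(permutation)
--     m = len(tasks[0])
--     C = [[0] * (m+1) for _ in range(n+1)]
--     for i in range(1, n+1):
--         for j in range(1, m+1):
--             C[i][j] = max(C[i-1][j], C[i][j-1]) + tasks[permutation[i-1]][j-1]
--     return C[n][m]
--
-- def jackson(tasks):
--     n = len(tasks)
--     # Tworzymy listę zadań do wykonania, posortowaną względem terminów dostępności
--     available_tasks = sorted(range(n), key=lambda x: tasks[x][0])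
--     # Inicjalizujemy permutację wynikową jako pustą listę
--     result_permutation = []
--     # Zerujemy licznik powtórzeń
--     repetitions_count = 0
--     # Dla każdego zadania w kolejności terminów dostępności
--     for task_idx in available_tasks:
--         # Szukamy pozycji w permutacji wynikowej, w której można umieścić to zadanie,
--         # tak, aby minimalizować wartość Cmax
--         best_pos = 0
--         best_Cmax = float('inf')
--         for pos in range(len(result_permutation)+1):
--             curr_permutation = result_permutation[:pos] + [task_idx] + result_permutation[pos:]
--             curr_Cmax = Cmax(curr_permutation, tasks)
--             # Zwiększamy licznik powtórzeń po każdym obliczeniu wartości funkcji Cmax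
--             repetitions_count += 1
--             if curr_Cmax < best_Cmax:
--                 best_Cmax = curr_Cmax
--                 best_pos = pos
--         # Dodajemy zadanie na najlepszej pozycji
--         result_permutation = result_permutation[:best_pos] + [task_idx] + result_permutation[best_pos:]
--     # Zwracamy wartość funkcji Cmax oraz licznik powtórzeń
--     return Cmax(result_permutation, tasks), repetitions_count
-- ===== SOURCE B (Python) =====
-- def _advance(c, t):
--     # one DP row: completion times on each machine after scheduling a job
--     # with processing times t, given previous completion times c
--     new = []
--     prev = 0
--     for cj, tj in zip(c, t):
--         prev = max(prev, cj) + tj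
--         new.append(prev)
--     return new
--
--
-- def jackson(tasks):
--     n = len(tasks)
--     m = len(tasks[0])
--     order = sorted(range(n), key=lambda x: tasks[x][0])
--     perm = []
--     for x in order:
--         k = len(perm)
--         # completion-time states after each prefix of the current permutation
--         states = [[0] * m]
--         for job in perm:
--             states.append(_advance(states[-1], tasks[job]))
--         best_pos = 0
--         best = None
--         for pos in range(k + 1):
--             c = _advance(states[pos], tasks[x])
--             for job in perm[pos:]:
--                 c = _advance(c, tasks[job])
--             v = c[-1]
--             if best is None or v < best:
--                 best = v
--                 best_pos = pos
--         perm.insert(best_pos, x)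
--     c = [0] * m
--     for job in perm:
--         c = _advance(c, tasks[job])
--     return c[-1], n * (n + 1) // 2
-- ===== Notes on version B (the rewrite author's own statement) =====
-- stated objective: alternative
-- what changed: B drops A's per-position rebuild (copying the candidate permutation and recomputing a full 2-D DP table for each insertion slot) in favour of 1-D rolling DP rows with the prefix states of the current permutation computed once per job and reused across all insertion positions, and replaces the incremented repetition counter by the closed form n*(n+1)//2; intended as a constant-factor saving (measured ~2.5x up to n=4096, unconfirmed at the largest probe size).
import Mathlib
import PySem

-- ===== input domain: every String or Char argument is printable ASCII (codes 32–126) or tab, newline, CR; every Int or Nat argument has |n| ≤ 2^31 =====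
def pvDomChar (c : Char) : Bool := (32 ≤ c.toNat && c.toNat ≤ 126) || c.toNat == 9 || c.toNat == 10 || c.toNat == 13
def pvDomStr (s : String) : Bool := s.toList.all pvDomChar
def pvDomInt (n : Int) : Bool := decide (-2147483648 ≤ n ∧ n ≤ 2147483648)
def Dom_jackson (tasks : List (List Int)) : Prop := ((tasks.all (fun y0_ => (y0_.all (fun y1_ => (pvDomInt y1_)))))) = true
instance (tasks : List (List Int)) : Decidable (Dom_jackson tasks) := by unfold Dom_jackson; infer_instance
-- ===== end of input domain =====

-- B replaces A's per-position from-scratch 2-D DP over freshly built candidate permutations by reusing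
-- the DP states of every prefix of the current permutation (1-D rolling rows) and computes the
-- repetition counter in closed form n(n+1)/2; same results by a different traversal (intended as a
-- constant-factor saving; a timing run measured ~2.5x at n<=4096 but could not confirm it at the largest size).

-- ===== PORT A =====
-- C[i][j] read/write; A's loops only use nonneg in-range indices, where pyGetD/pySetD are exact
def mgetA (C : List (List Int)) (i j : Int) : Int :=
  PySem.List.pyGetD (PySem.List.pyGetD C i []) j 0
def msetA (C : List (List Int)) (i j : Int) (v : Int) : List (List Int) :=
  PySem.List.pySetD C i (PySem.List.pySetD (PySem.List.pyGetD C i []) j v)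
def tvalA (tasks : List (List Int)) (i j : Int) : Int :=
  PySem.List.pyGetD (PySem.List.pyGetD tasks i []) j 0

def CmaxA (perm : List Int) (tasks : List (List Int)) : Int :=
  let n : Int := perm.length
  let m : Int := (PySem.List.pyGetD tasks 0 []).length
  let C0 : List (List Int) := List.replicate (n.toNat + 1) (List.replicate (m.toNat + 1) 0)
  let C := (PySem.List.pyRange 1 (n + 1) 1).foldl (fun C i =>
    (PySem.List.pyRange 1 (m + 1) 1).foldl (fun C j =>
      msetA C i j (max (mgetA C (i - 1) j) (mgetA C i (j - 1)) +
        tvalA tasks (PySem.List.pyGetD perm (i - 1) 0) (j - 1))) C) C0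
  mgetA C n m

-- best_Cmax starts as float('inf'): ported as Option Int with none = +inf (every int < inf)
def jackson (tasks : List (List Int)) : Int × Int :=
  let n : Int := tasks.length
  let available := PySem.List.sorted (PySem.List.pyRange 0 n 1) (fun x => tvalA tasks x 0) false
  let st := available.foldl (fun (st : List Int × Int) taskIdx =>
    let result := st.1
    let inner := (PySem.List.pyRange 0 ((result.length : Int) + 1) 1).foldl
      (fun (s : Int × Option Int × Int) pos =>
        let c := CmaxA (PySem.List.slice result none (some pos) ++ [taskIdx] ++
                        PySem.List.slice result (some pos) none) tasks
        let reps := s.2.2 + 1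
        match s.2.1 with
        | none => (pos, some c, reps)
        | some b => if c < b then (pos, some c, reps) else (s.1, some b, reps))
      (0, none, st.2)
    (PySem.List.slice result none (some inner.1) ++ [taskIdx] ++
       PySem.List.slice result (some inner.1) none, inner.2.2))
    ([], 0)
  (CmaxA st.1 tasks, st.2)

-- ===== PORT B =====
def advanceB (c t : List Int) : List Int :=
  ((c.zip t).foldl (fun (s : List Int × Int) ct =>
    let p := max s.2 ct.1 + ct.2
    (s.1 ++ [p], p)) ([], 0)).1

def rowB (tasks : List (List Int)) (i : Int) : List Int := PySem.List.pyGetD tasks i []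

def jackson_alt (tasks : List (List Int)) : Int × Int :=
  let n : Int := tasks.length
  let m : Nat := (rowB tasks 0).length
  let order := PySem.List.sorted (PySem.List.pyRange 0 n 1)
    (fun x => PySem.List.pyGetD (rowB tasks x) 0 0) false
  let perm := order.foldl (fun (perm : List Int) x =>
    let states := perm.foldl (fun (sts : List (List Int)) job =>
        sts ++ [advanceB (PySem.List.pyGetD sts (-1) []) (rowB tasks job)])
      [List.replicate m (0 : Int)]
    let sel := (PySem.List.pyRange 0 ((perm.length : Int) + 1) 1).foldl
      (fun (s : Int × Option Int) pos =>
        let v := PySem.List.pyGetD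
          ((PySem.List.slice perm (some pos) none).foldl
            (fun c job => advanceB c (rowB tasks job))
            (advanceB (PySem.List.pyGetD states pos []) (rowB tasks x))) (-1) 0
        match s.2 with
        | none => (pos, some v)
        | some b => if v < b then (pos, some v) else s)
      (0, none)
    PySem.List.insert perm sel.1 x) []
  (PySem.List.pyGetD (perm.foldl (fun c job => advanceB c (rowB tasks job))
     (List.replicate m (0 : Int))) (-1) 0,
   PySem.Int.floordiv (n * (n + 1)) 2)

-- ===== PRECONDITION & SPEC =====
-- Pre_ excludes exactly the inputs where A raises IndexError: empty task list, an empty job row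
-- (the sort key tasks[x][0]), or a row shorter than row 0 (Cmax reads m = len(tasks[0]) entries of every row).
def Pre_jackson (tasks : List (List Int)) : Prop :=
  tasks ≠ [] ∧ ∀ row ∈ tasks, row ≠ [] ∧ (tasks.headD []).length ≤ row.length
instance (tasks : List (List Int)) : Decidable (Pre_jackson tasks) := by
  unfold Pre_jackson; infer_instance
def pvWitness_jackson : List (List Int) := [[2, 1], [1, 3], [3, 2]]

def Spec_jackson (tasks : List (List Int)) (out : Int × Int) : Prop := out = jackson_alt tasks
instance (tasks : List (List Int)) (out : Int × Int) : Decidable (Spec_jackson tasks out) := by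
  unfold Spec_jackson; infer_instance

-- ===== CLAIM (what is proved, stated in full; the proofs are below) =====
def Claim_equal_jackson : Prop := ∀ (tasks : List (List Int)), Dom_jackson tasks → Pre_jackson tasks → Spec_jackson tasks (jackson tasks)

-- ===== LEMMAS AND PROOFS =====

-- reference form of one DP row update: adv c t prev = completion times, threading the running max
def adv : List Int → List Int → Int → List Int
  | c :: cs, t :: ts, prev => (max prev c + t) :: adv cs ts (max prev c + t)
  | _, _, _ => []

-- reference makespan state of a job list
def stateOf (tasks : List (List Int)) (m : Nat) (l : List Int) : List Int :=
  l.foldl (fun c j => adv c (rowB tasks j) 0) (List.replicate m 0)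

lemma adv_length (c t : List Int) (p : Int) (h : c.length ≤ t.length) :
    (adv c t p).length = c.length := by
  induction c generalizing t p with
  | nil => simp [adv]
  | cons a cs ih =>
    cases t with
    | nil => simp at h
    | cons b ts => simp [adv]; exact ih ts _ (by simpa using h)

lemma advanceB_aux (c : List Int) : ∀ (t acc : List Int) (p : Int),
    (c.zip t).foldl (fun (s : List Int × Int) ct =>
      (s.1 ++ [max s.2 ct.1 + ct.2], max s.2 ct.1 + ct.2)) (acc, p)
    = (acc ++ adv c t p, (adv c t p).getLastD p) := by
  induction c with
  | nil => intro t acc p; simp [adv]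
  | cons a cs ih =>
    intro t acc p
    cases t with
    | nil => simp [adv]
    | cons b ts =>
      simp only [List.zip_cons_cons, List.foldl_cons, adv]
      rw [ih ts (acc ++ [max p a + b]) (max p a + b)]
      cases adv cs ts (max p a + b) <;> simp [List.getLast?_cons]

lemma advanceB_eq (c t : List Int) : advanceB c t = adv c t 0 := by
  unfold advanceB
  rw [advanceB_aux c t [] 0]
  simp

lemma stateOf_length (tasks : List (List Int)) (m : Nat) (l : List Int)
    (h : ∀ j ∈ l, m ≤ (rowB tasks j).length) :
    (stateOf tasks m l).length = m := by
  unfold stateOf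
  suffices H : ∀ (l' st : List Int), (∀ j ∈ l', m ≤ (rowB tasks j).length) → st.length = m →
      (l'.foldl (fun c j => adv c (rowB tasks j) 0) st).length = m by
    exact H l _ h (by simp)
  intro l'
  induction l' with
  | nil => intro st _ hst; simpa using hst
  | cons j js ih =>
    intro st hl' hst
    simp only [List.foldl_cons]
    refine ih _ (fun x hx => hl' x (List.mem_cons_of_mem _ hx)) ?_
    rw [adv_length _ _ _ (hst ▸ hl' j (List.mem_cons_self ..))]
    exact hst

lemma getD_cons_length (s : List Int) (a d : Int) : (a :: s).getD s.length d = s.getLastD a := by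
  induction s generalizing a with
  | nil => simp
  | cons b bs ih => rw [List.getLastD_cons]; simpa using ih b

lemma set_append_len {α : Type} (u : List α) (x y : α) (v : List α) :
    (u ++ x :: v).set u.length y = u ++ y :: v := by
  induction u with
  | nil => simp
  | cons a us ih => simp [ih]

lemma bang_append_len {α : Type} [Inhabited α] (u : List α) (x : α) (v : List α) :
    (u ++ x :: v)[u.length]! = x := by
  rw [getElem!_pos (u ++ x :: v) u.length (by simp)]
  simp

lemma bang_append_last {α : Type} [Inhabited α] (u : List α) (v : List α) (d : α) (hu : u ≠ []) :
    (u ++ v)[u.length - 1]! = u.getLastD d := by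
  have h1 : u.length - 1 < u.length := by
    cases u with | nil => exact absurd rfl hu | cons a us => simp
  rw [getElem!_pos (u ++ v) (u.length - 1) (by simp; omega)]
  rw [List.getElem_append_left h1]
  rw [List.getLastD_eq_getLast?, List.getLast?_eq_getElem?]
  simp [List.getElem?_eq_getElem h1]

lemma bang_of_drop_cons {α : Type} [Inhabited α] (T : List α) (k : Nat) (t : α) (ts : List α)
    (h : T.drop k = t :: ts) : T[k]! = t := by
  have hk : k < T.length := by
    by_contra hk
    rw [List.drop_eq_nil_of_le (by omega)] at h
    exact absurd h (by simp)
  have h0 : T[k]? = some t := by rw [← List.head?_drop, h]; rfl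
  rw [getElem!_pos T k hk]
  simpa [List.getElem?_eq_getElem hk] using h0

lemma bang_set_self {α : Type} [Inhabited α] (C : List α) (n : Nat) (x : α) (h : n < C.length) :
    (C.set n x)[n]! = x := by
  rw [getElem!_pos (C.set n x) n (by simpa), List.getElem_set_self]

lemma bang_set_ne {α : Type} [Inhabited α] (C : List α) (p n : Nat) (x : α)
    (hne : p ≠ n) (hp : p < C.length) : (C.set n x)[p]! = C[p]! := by
  rw [getElem!_pos (C.set n x) p (by simpa), getElem!_pos C p hp,
    List.getElem_set_ne (id (Ne.symm hne))]

lemma pyGetD_bang {α : Type} [Inhabited α] (xs : List α) (i : Int) (d : α)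
    (h0 : 0 ≤ i) (h : i.toNat < xs.length) :
    PySem.List.pyGetD xs i d = xs[i.toNat]! := by
  rw [PySem.List.pyGetD_eq_getElem xs d h0 (by omega), getElem!_pos xs i.toNat h]

-- the inner j-loop of A's Cmax writes row i = pre ++ adv rrem trem (last of pre)
lemma innerA (tasks : List (List Int)) (jb i : Int) (hi : 1 ≤ i) :
    ∀ (rrem : List Int) (trem u pre : List Int) (C : List (List Int)) (j0 : Int),
    1 ≤ j0 → i.toNat < C.length →
    C[(i - 1).toNat]! = u ++ rrem → u.length = j0.toNat →
    C[i.toNat]! = pre ++ List.replicate rrem.length 0 → pre.length = j0.toNat →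
    (PySem.List.pyGetD tasks jb []).drop (j0.toNat - 1) = trem →
    rrem.length ≤ trem.length →
    (PySem.List.pyRange j0 (j0 + rrem.length) 1).foldl
      (fun C j => msetA C i j (max (mgetA C (i - 1) j) (mgetA C i (j - 1)) +
        tvalA tasks jb (j - 1))) C
    = C.set i.toNat (pre ++ adv rrem trem (pre.getLastD 0)) := by
  intro rrem
  induction rrem with
  | nil =>
    intro trem u pre C j0 hj0 hiC hrow1 hu hrowi hpre htrem hlen
    rw [PySem.List.pyRange_one_eq_nil (by simp)]
    simp only [List.foldl_nil, adv]
    simp only [List.length_nil, List.replicate_zero, List.append_nil] at hrowi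
    rw [List.append_nil, ← hrowi, getElem!_pos C i.toNat hiC, List.set_getElem_self]
  | cons r rs ih =>
    intro trem u pre C j0 hj0 hiC hrow1 hu hrowi hpre htrem hlen
    cases trem with
    | nil => simp at hlen
    | cons t ts =>
      have hi0 : (0 : Int) ≤ i := by omega
      have hi1C : (i - 1).toNat < C.length := by omega
      have hj00 : (0 : Int) ≤ j0 := by omega
      have hpre0 : pre ≠ [] := by
        intro hc; rw [hc] at hpre; simp at hpre; omega
      set T := PySem.List.pyGetD tasks jb [] with hT
      have hTlen : T.length - (j0.toNat - 1) = ts.length + 1 := by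
        rw [← List.length_drop, htrem]; simp
      have hrowiget : PySem.List.pyGetD C i [] = pre ++ List.replicate (r :: rs).length 0 := by
        rw [pyGetD_bang C i [] hi0 hiC, hrowi]
      have hrow1get : PySem.List.pyGetD C (i - 1) [] = u ++ r :: rs := by
        rw [pyGetD_bang C (i - 1) [] (by omega) hi1C, hrow1]
      have hm1 : mgetA C (i - 1) j0 = r := by
        unfold mgetA
        rw [hrow1get, pyGetD_bang _ j0 0 hj00 (by simp; omega), ← hu, bang_append_len]
      have hm2 : mgetA C i (j0 - 1) = pre.getLastD 0 := by
        unfold mgetA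
        rw [hrowiget, pyGetD_bang _ (j0 - 1) 0 (by omega) (by simp; omega),
          show (j0 - 1).toNat = pre.length - 1 from by omega,
          bang_append_last pre _ 0 hpre0]
      have ht : tvalA tasks jb (j0 - 1) = t := by
        unfold tvalA
        rw [← hT, pyGetD_bang T (j0 - 1) 0 (by omega) (by omega),
          show (j0 - 1).toNat = j0.toNat - 1 from by omega,
          bang_of_drop_cons T _ t ts htrem]
      set q : Int := max (pre.getLastD 0) r + t with hq
      have hstep : msetA C i j0 (max (mgetA C (i - 1) j0) (mgetA C i (j0 - 1)) +
          tvalA tasks jb (j0 - 1)) = C.set i.toNat (pre ++ q :: List.replicate rs.length 0) := by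
        rw [hm1, hm2, ht]
        unfold msetA
        rw [hrowiget, PySem.List.pySetD_of_nonneg _ _ hi0, PySem.List.pySetD_of_nonneg _ _ hj00,
          show (r :: rs).length = rs.length + 1 from rfl, List.replicate_succ,
          ← hpre, set_append_len, hq, max_comm r (pre.getLastD 0)]
      rw [PySem.List.pyRange_one_cons (by simp)]
      simp only [List.foldl_cons]
      rw [hstep]
      have hrange : j0 + ((r :: rs).length : Int) = (j0 + 1) + (rs.length : Int) := by
        simp; ring
      rw [hrange]
      rw [ih ts (u ++ [r]) (pre ++ [q]) _ (j0 + 1) (by omega)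
        (by simpa using hiC)
        (by rw [bang_set_ne _ _ _ _ (by omega) hi1C, hrow1]; simp)
        (by simp; omega)
        (by rw [bang_set_self _ _ _ hiC]; simp)
        (by simp; omega)
        (by rw [show (j0 + 1).toNat - 1 = (j0.toNat - 1) + 1 from by omega,
               ← List.drop_drop, htrem]; rfl)
        (by simpa using hlen)]
      rw [List.set_set, List.getLastD_concat]
      have : adv (r :: rs) (t :: ts) (pre.getLastD 0) = q :: adv rs ts q := by
        simp [adv, hq]
      rw [this]
      simp

-- the outer i-loop of A's Cmax: row n of the final table is 0 :: (fold of adv over the remaining jobs)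
lemma outerA (tasks : List (List Int)) (perm : List Int) (m : Nat)
    (hrows : ∀ j ∈ perm, m ≤ (rowB tasks j).length) :
    ∀ (rem : List Int) (i0 : Nat) (C : List (List Int)) (st : List Int),
    perm.drop i0 = rem → i0 + rem.length = perm.length →
    C.length = perm.length + 1 →
    C[i0]! = 0 :: st → st.length = m →
    (∀ p : Nat, i0 < p → p ≤ perm.length → C[p]! = List.replicate (m + 1) 0) →
    ((PySem.List.pyRange ((i0 : Int) + 1) ((perm.length : Int) + 1) 1).foldl
      (fun C i => (PySem.List.pyRange 1 ((m : Int) + 1) 1).foldl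
        (fun C j => msetA C i j (max (mgetA C (i - 1) j) (mgetA C i (j - 1)) +
          tvalA tasks (PySem.List.pyGetD perm (i - 1) 0) (j - 1))) C) C)[perm.length]!
    = 0 :: rem.foldl (fun c j => adv c (rowB tasks j) 0) st := by
  intro rem
  induction rem with
  | nil =>
    intro i0 C st hrem hlen hClen hCi hst hzero
    rw [show PySem.List.pyRange ((i0 : Int) + 1) ((perm.length : Int) + 1) 1 = []
      from PySem.List.pyRange_one_eq_nil (by simp at hlen; omega)]
    simp only [List.foldl_nil]
    have : i0 = perm.length := by simp at hlen; omega
    rw [← this, hCi]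
  | cons j js ih =>
    intro i0 C st hrem hlen hClen hCi hst hzero
    have hi0lt : i0 < perm.length := by simp at hlen; omega
    have hmem : j ∈ perm := List.drop_subset i0 perm (hrem ▸ List.mem_cons_self ..)
    have hstT : st.length ≤ (PySem.List.pyGetD tasks j []).length := by
      rw [hst]; exact hrows j hmem
    have hjb : PySem.List.pyGetD perm ((i0 : Int) + 1 - 1) 0 = j := by
      rw [pyGetD_bang perm _ 0 (by omega) (by omega),
        show ((i0 : Int) + 1 - 1).toNat = i0 from by omega,
        bang_of_drop_cons perm i0 j js hrem]
    rw [show PySem.List.pyRange ((i0 : Int) + 1) ((perm.length : Int) + 1) 1 =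
        ((i0 : Int) + 1) :: PySem.List.pyRange ((i0 : Int) + 1 + 1) ((perm.length : Int) + 1) 1
      from PySem.List.pyRange_one_cons (by omega)]
    simp only [List.foldl_cons]
    rw [hjb]
    have hstep := innerA tasks j ((i0 : Int) + 1) (by omega) st (PySem.List.pyGetD tasks j [])
      [0] [0] C 1 (by omega)
      (by simp; omega)
      (by rw [show ((i0 : Int) + 1 - 1).toNat = i0 from by omega, hCi]; rfl)
      (by simp)
      (by rw [show ((i0 : Int) + 1).toNat = i0 + 1 from by omega,
             hzero (i0 + 1) (by omega) (by omega), ← hst]; simp [List.replicate_succ])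
      (by simp)
      (by simp)
      hstT
    rw [show (1 + (st.length : Int)) = ((m : Int) + 1) from by rw [hst]; ring] at hstep
    rw [hstep]
    have hC' : C.set ((i0 : Int) + 1).toNat
        ([0] ++ adv st (PySem.List.pyGetD tasks j []) (List.getLastD [0] 0))
        = C.set (i0 + 1) (0 :: adv st (PySem.List.pyGetD tasks j []) 0) := by
      norm_num
    rw [hC']
    have hadvlen : (adv st (PySem.List.pyGetD tasks j []) 0).length = m := by
      rw [adv_length _ _ _ hstT, hst]
    rw [show ((i0 : Int) + 1 + 1) = (((i0 + 1 : Nat) : Int) + 1) from by push_cast; ring]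
    rw [ih (i0 + 1) _ _
      (by rw [← List.drop_drop, hrem]; rfl)
      (by simp at hlen ⊢; omega)
      (by simpa using hClen)
      (by rw [bang_set_self _ _ _ (by omega)])
      hadvlen
      (fun p hp1 hp2 => by
        rw [bang_set_ne _ _ _ _ (by omega) (by omega), hzero p (by omega) hp2])]
    rfl

lemma msetA_length (C : List (List Int)) (i j v : Int) : (msetA C i j v).length = C.length := by
  simp [msetA, PySem.List.length_pySetD]

lemma foldl_length {α : Type} (f : List (List Int) → α → List (List Int))
    (hf : ∀ C x, (f C x).length = C.length) :
    ∀ (l : List α) (C : List (List Int)), (l.foldl f C).length = C.length := by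
  intro l
  induction l with
  | nil => intro C; rfl
  | cons a as ih => intro C; rw [List.foldl_cons, ih, hf]

lemma getD_cons_len' (s : List Int) (a d : Int) (m : Nat) (h : s.length = m) :
    (a :: s).getD m d = s.getLastD a := by
  rw [← h, getD_cons_length]

lemma mgetA_out (C : List (List Int)) (i j : Int) :
    mgetA C i j = PySem.List.pyGetD (PySem.List.pyGetD C i []) j 0 := rfl

lemma CmaxA_eq (tasks : List (List Int)) (perm : List Int)
    (hrows : ∀ j ∈ perm, (rowB tasks 0).length ≤ (rowB tasks j).length) :
    CmaxA perm tasks = (stateOf tasks (rowB tasks 0).length perm).getLastD 0 := by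
  simp only [CmaxA, Int.toNat_natCast]
  set m : Nat := (PySem.List.pyGetD tasks 0 ([] : List Int)).length with hm
  have hstF : (perm.foldl (fun c j => adv c (rowB tasks j) 0) (List.replicate m 0)).length = m :=
    stateOf_length tasks m perm hrows
  have h0 := outerA tasks perm m hrows perm 0
    (List.replicate (perm.length + 1) (List.replicate (m + 1) 0)) (List.replicate m 0)
    (by simp) (by simp) (by simp)
    (by rw [getElem!_pos _ _ (by simp)]; simp [List.replicate_succ])
    (by simp)
    (fun p hp1 hp2 => by rw [getElem!_pos _ _ (by simp; omega)]; simp)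
  rw [show (((0 : Nat) : Int) + 1) = 1 from by norm_num] at h0
  have hflen : ((PySem.List.pyRange 1 ((perm.length : Int) + 1) 1).foldl
      (fun C i => (PySem.List.pyRange 1 ((m : Int) + 1) 1).foldl
        (fun C j => msetA C i j (max (mgetA C (i - 1) j) (mgetA C i (j - 1)) +
          tvalA tasks (PySem.List.pyGetD perm (i - 1) 0) (j - 1))) C)
      (List.replicate (perm.length + 1) (List.replicate (m + 1) 0))).length
      = perm.length + 1 := by
    rw [foldl_length _ (fun C i => foldl_length _ (fun C j => msetA_length C i j _) _ C)]
    simp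
  rw [mgetA_out]
  rw [pyGetD_bang _ _ [] (by positivity) (by rw [Int.toNat_natCast, hflen]; omega),
    Int.toNat_natCast, h0, PySem.List.pyGetD_natCast]
  exact getD_cons_len' _ 0 0 m hstF

-- B-side: the states list built by B is the scan of adv over the permutation
def scanB (tasks : List (List Int)) (c : List Int) : List Int → List (List Int)
  | [] => []
  | j :: js => adv c (rowB tasks j) 0 :: scanB tasks (adv c (rowB tasks j) 0) js

lemma advFold_length (tasks : List (List Int)) (m : Nat) :
    ∀ (l st : List Int), (∀ j ∈ l, m ≤ (rowB tasks j).length) → st.length = m →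
    (l.foldl (fun c j => adv c (rowB tasks j) 0) st).length = m := by
  intro l
  induction l with
  | nil => intro st _ hst; simpa using hst
  | cons j js ih =>
    intro st hl hst
    simp only [List.foldl_cons]
    refine ih _ (fun y hy => hl y (List.mem_cons_of_mem _ hy)) ?_
    rw [adv_length _ _ _ (hst ▸ hl j (List.mem_cons_self ..))]
    exact hst

lemma getLast_eq_getLastD (c : List Int) (h : c ≠ []) : c.getLast h = c.getLastD 0 := by
  rw [List.getLastD_eq_getLast?, List.getLast?_eq_some_getLast h]
  rfl

lemma statesB_eq (tasks : List (List Int)) :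
    ∀ (l : List Int) (acc : List (List Int)) (c : List Int), acc.getLast? = some c →
    l.foldl (fun sts job => sts ++ [advanceB (PySem.List.pyGetD sts (-1) []) (rowB tasks job)]) acc
    = acc ++ scanB tasks c l := by
  intro l
  induction l with
  | nil => intro acc c _; simp [scanB]
  | cons j js ih =>
    intro acc c h
    have hne : acc ≠ [] := by intro hc; rw [hc] at h; simp at h
    have hlast : acc.getLast hne = c := by
      rw [List.getLast?_eq_some_getLast hne] at h
      exact Option.some.inj h
    simp only [List.foldl_cons]
    rw [PySem.List.pyGetD_neg_one acc [] hne, hlast, advanceB_eq]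
    rw [ih (acc ++ [adv c (rowB tasks j) 0]) (adv c (rowB tasks j) 0) (by simp)]
    simp [scanB]

lemma scanB_getD (tasks : List (List Int)) :
    ∀ (l : List Int) (c : List Int) (pos : Nat), pos ≤ l.length →
    (c :: scanB tasks c l).getD pos [] = (l.take pos).foldl (fun cc j => adv cc (rowB tasks j) 0) c := by
  intro l
  induction l with
  | nil =>
    intro c pos h
    have : pos = 0 := by simpa using h
    simp [this]
  | cons j js ih =>
    intro c pos h
    cases pos with
    | zero => simp
    | succ p =>
      rw [show scanB tasks c (j :: js)
          = adv c (rowB tasks j) 0 :: scanB tasks (adv c (rowB tasks j) 0) js from rfl]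
      simp only [List.getD_cons_succ, List.take_succ_cons, List.foldl_cons]
      exact ih _ p (by simpa using h)

-- both selection loops pick the same (first) minimising position; A additionally counts
lemma selEq (fA fB : Int → Int) :
    ∀ (l : List Int), (∀ p ∈ l, fA p = fB p) → ∀ (bp : Int) (b : Option Int) (r : Int),
    l.foldl (fun (s : Int × Option Int × Int) pos =>
        let c := fA pos
        let reps := s.2.2 + 1
        match s.2.1 with
        | none => (pos, some c, reps)
        | some bb => if c < bb then (pos, some c, reps) else (s.1, some bb, reps)) (bp, b, r)
    = ((l.foldl (fun (s : Int × Option Int) pos =>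
        let v := fB pos
        match s.2 with
        | none => (pos, some v)
        | some bb => if v < bb then (pos, some v) else s) (bp, b)).1,
       (l.foldl (fun (s : Int × Option Int) pos =>
        let v := fB pos
        match s.2 with
        | none => (pos, some v)
        | some bb => if v < bb then (pos, some v) else s) (bp, b)).2,
       r + (l.length : Int)) := by
  intro l
  induction l with
  | nil => intro _ bp b r; simp
  | cons p ps ih =>
    intro h bp b r
    have hp : fA p = fB p := h p (List.mem_cons_self ..)
    simp only [List.foldl_cons]
    cases b with
    | none =>
      dsimp only
      rw [hp, ih (fun q hq => h q (List.mem_cons_of_mem _ hq)) p (some (fB p)) (r + 1)]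
      simp only [Prod.mk.injEq, List.length_cons]
      exact ⟨trivial, trivial, by push_cast; ring⟩
    | some bb =>
      dsimp only
      rw [hp]
      by_cases hc : fB p < bb
      · simp only [if_pos hc]
        rw [ih (fun q hq => h q (List.mem_cons_of_mem _ hq)) p (some (fB p)) (r + 1)]
        simp only [Prod.mk.injEq, List.length_cons]
        exact ⟨trivial, trivial, by push_cast; ring⟩
      · simp only [if_neg hc]
        rw [ih (fun q hq => h q (List.mem_cons_of_mem _ hq)) bp (some bb) (r + 1)]
        simp only [Prod.mk.injEq, List.length_cons]
        exact ⟨trivial, trivial, by push_cast; ring⟩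

lemma selP (fB : Int → Int) (P : Int → Prop) :
    ∀ (l : List Int) (bp : Int) (b : Option Int), P bp → (∀ p ∈ l, P p) →
    P ((l.foldl (fun (s : Int × Option Int) pos =>
        let v := fB pos
        match s.2 with
        | none => (pos, some v)
        | some bb => if v < bb then (pos, some v) else s) (bp, b)).1) := by
  intro l
  induction l with
  | nil => intro bp b hbp _; exact hbp
  | cons p ps ih =>
    intro bp b hbp h
    simp only [List.foldl_cons]
    cases b with
    | none =>
      exact ih p (some (fB p)) (h p (List.mem_cons_self ..))
        (fun q hq => h q (List.mem_cons_of_mem _ hq))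
    | some bb =>
      dsimp only
      by_cases hc : fB p < bb
      · simp only [if_pos hc]
        exact ih p (some (fB p)) (h p (List.mem_cons_self ..))
          (fun q hq => h q (List.mem_cons_of_mem _ hq))
      · simp only [if_neg hc]
        exact ih bp (some bb) hbp (fun q hq => h q (List.mem_cons_of_mem _ hq))

lemma rowValid (tasks : List (List Int)) (m : Nat) (hrows : ∀ row ∈ tasks, m ≤ row.length) :
    ∀ j : Int, 0 ≤ j → j < (tasks.length : Int) → m ≤ (rowB tasks j).length := by
  intro j h1 h2
  refine hrows _ ?_
  unfold rowB
  rw [pyGetD_bang tasks j [] h1 (by omega), getElem!_pos tasks j.toNat (by omega)]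
  exact List.getElem_mem _

lemma advanceB_fun_eq (tasks : List (List Int)) :
    (fun (c : List Int) job => advanceB c (rowB tasks job))
    = (fun (c : List Int) job => adv c (rowB tasks job) 0) := by
  funext c job
  exact advanceB_eq c (rowB tasks job)

-- A's candidate makespan at an insertion position = B's continued-from-prefix-state makespan
lemma candEq (tasks : List (List Int)) (m : Nat) (hm : m = (rowB tasks 0).length) (hm1 : 1 ≤ m)
    (hrows : ∀ row ∈ tasks, m ≤ row.length)
    (result : List Int) (x : Int)
    (hres : ∀ j ∈ result, 0 ≤ j ∧ j < tasks.length)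
    (hx : 0 ≤ x ∧ x < tasks.length)
    (pos : Int) (hpos : 0 ≤ pos) (hpos2 : pos ≤ (result.length : Int)) :
    CmaxA (PySem.List.slice result none (some pos) ++ [x] ++ PySem.List.slice result (some pos) none) tasks
    = PySem.List.pyGetD
        ((PySem.List.slice result (some pos) none).foldl (fun c job => advanceB c (rowB tasks job))
          (advanceB (PySem.List.pyGetD
             (result.foldl (fun sts job => sts ++ [advanceB (PySem.List.pyGetD sts (-1) []) (rowB tasks job)])
               [List.replicate m (0 : Int)]) pos []) (rowB tasks x))) (-1) 0 := by
  have hvalid := rowValid tasks m hrows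
  rw [PySem.List.slice_to result hpos, PySem.List.slice_from result hpos]
  set cand := result.take pos.toNat ++ [x] ++ result.drop pos.toNat with hcand
  have hcandv : ∀ j ∈ cand, 0 ≤ j ∧ j < (tasks.length : Int) := by
    intro j hj
    rw [hcand] at hj
    simp only [List.append_assoc, List.mem_append, List.mem_cons, List.not_mem_nil, or_false] at hj
    rcases hj with hj | hj | hj
    · exact hres j (List.take_subset _ _ hj)
    · exact hj ▸ hx
    · exact hres j (List.drop_subset _ _ hj)
  have hcandrows : ∀ j ∈ cand, m ≤ (rowB tasks j).length :=
    fun j hj => hvalid j (hcandv j hj).1 (hcandv j hj).2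
  rw [CmaxA_eq tasks cand (fun j hj => hm ▸ hcandrows j hj)]
  rw [statesB_eq tasks result [List.replicate m 0] (List.replicate m 0) (by simp)]
  rw [List.singleton_append]
  have hget : PySem.List.pyGetD (List.replicate m (0 : Int) :: scanB tasks (List.replicate m 0) result) pos []
      = (List.replicate m (0 : Int) :: scanB tasks (List.replicate m 0) result).getD pos.toNat [] := by
    conv_lhs => rw [← Int.toNat_of_nonneg hpos]
    rw [PySem.List.pyGetD_natCast]
  rw [hget, scanB_getD tasks result (List.replicate m 0) pos.toNat (by omega)]
  rw [advanceB_fun_eq tasks, advanceB_eq]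
  have hresrows : ∀ j ∈ result, m ≤ (rowB tasks j).length :=
    fun j hj => hvalid j (hres j hj).1 (hres j hj).2
  have htlen : ((result.take pos.toNat).foldl (fun cc j => adv cc (rowB tasks j) 0)
      (List.replicate m 0)).length = m :=
    advFold_length tasks m _ _ (fun j hj => hresrows j (List.take_subset _ _ hj)) (by simp)
  have hclen : ((result.drop pos.toNat).foldl (fun c j => adv c (rowB tasks j) 0)
      (adv ((result.take pos.toNat).foldl (fun cc j => adv cc (rowB tasks j) 0)
        (List.replicate m 0)) (rowB tasks x) 0)).length = m := by
    refine advFold_length tasks m _ _ (fun j hj => hresrows j (List.drop_subset _ _ hj)) ?_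
    rw [adv_length _ _ _ (by rw [htlen]; exact hvalid x hx.1 hx.2)]
    exact htlen
  have hne : (result.drop pos.toNat).foldl (fun c j => adv c (rowB tasks j) 0)
      (adv ((result.take pos.toNat).foldl (fun cc j => adv cc (rowB tasks j) 0)
        (List.replicate m 0)) (rowB tasks x) 0) ≠ [] := by
    intro hc
    rw [hc] at hclen
    simp at hclen
    omega
  rw [PySem.List.pyGetD_neg_one _ 0 hne, getLast_eq_getLastD]
  rw [← hm]
  have hlhs : stateOf tasks m cand
      = (result.drop pos.toNat).foldl (fun c j => adv c (rowB tasks j) 0)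
        (adv ((result.take pos.toNat).foldl (fun cc j => adv cc (rowB tasks j) 0)
          (List.replicate m 0)) (rowB tasks x) 0) := by
    rw [hcand]
    unfold stateOf
    rw [List.foldl_append, List.foldl_append]
    rfl
  rw [hlhs]

lemma finalEq (tasks : List (List Int)) (m : Nat) (hm : m = (rowB tasks 0).length) (hm1 : 1 ≤ m)
    (hrows : ∀ row ∈ tasks, m ≤ row.length)
    (perm : List Int) (hperm : ∀ j ∈ perm, 0 ≤ j ∧ j < tasks.length) :
    CmaxA perm tasks
    = PySem.List.pyGetD (perm.foldl (fun c job => advanceB c (rowB tasks job))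
        (List.replicate m (0 : Int))) (-1) 0 := by
  have hvalid := rowValid tasks m hrows
  have hpermrows : ∀ j ∈ perm, m ≤ (rowB tasks j).length :=
    fun j hj => hvalid j (hperm j hj).1 (hperm j hj).2
  rw [CmaxA_eq tasks perm (fun j hj => hm ▸ hpermrows j hj)]
  rw [advanceB_fun_eq tasks]
  have hlen : (perm.foldl (fun c j => adv c (rowB tasks j) 0) (List.replicate m 0)).length = m :=
    advFold_length tasks m perm _ hpermrows (by simp)
  have hne : perm.foldl (fun c j => adv c (rowB tasks j) 0) (List.replicate m (0 : Int)) ≠ [] := by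
    intro hc
    rw [hc] at hlen
    simp at hlen
    omega
  rw [PySem.List.pyGetD_neg_one _ 0 hne, getLast_eq_getLastD, ← hm]
  rfl

-- the exact number of Cmax evaluations A performs, as A accumulates it
def repsFun : Nat → Nat → Nat
  | _, 0 => 0
  | k, c + 1 => (k + 1) + repsFun (k + 1) c

lemma repsFun_gauss : ∀ (c k : Nat), 2 * repsFun k c = 2 * c * k + c * (c + 1) := by
  intro c
  induction c with
  | zero => intro k; simp [repsFun]
  | succ c ih =>
    intro k
    show 2 * ((k + 1) + repsFun (k + 1) c) = _
    rw [Nat.mul_add, ih (k + 1)]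
    ring

def stepA (tasks : List (List Int)) : List Int × Int → Int → List Int × Int :=
  fun (st : List Int × Int) taskIdx =>
    let result := st.1
    let inner := (PySem.List.pyRange 0 ((result.length : Int) + 1) 1).foldl
      (fun (s : Int × Option Int × Int) pos =>
        let c := CmaxA (PySem.List.slice result none (some pos) ++ [taskIdx] ++
                        PySem.List.slice result (some pos) none) tasks
        let reps := s.2.2 + 1
        match s.2.1 with
        | none => (pos, some c, reps)
        | some b => if c < b then (pos, some c, reps) else (s.1, some b, reps))
      (0, none, st.2)
    (PySem.List.slice result none (some inner.1) ++ [taskIdx] ++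
       PySem.List.slice result (some inner.1) none, inner.2.2)

def stepBd (tasks : List (List Int)) (m : Nat) : List Int → Int → List Int :=
  fun (perm : List Int) x =>
    let states := perm.foldl (fun (sts : List (List Int)) job =>
        sts ++ [advanceB (PySem.List.pyGetD sts (-1) []) (rowB tasks job)])
      [List.replicate m (0 : Int)]
    let sel := (PySem.List.pyRange 0 ((perm.length : Int) + 1) 1).foldl
      (fun (s : Int × Option Int) pos =>
        let v := PySem.List.pyGetD
          ((PySem.List.slice perm (some pos) none).foldl
            (fun c job => advanceB c (rowB tasks job))
            (advanceB (PySem.List.pyGetD states pos []) (rowB tasks x))) (-1) 0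
        match s.2 with
        | none => (pos, some v)
        | some b => if v < b then (pos, some v) else s)
      (0, none)
    PySem.List.insert perm sel.1 x

lemma mainLoop (tasks : List (List Int)) (m : Nat) (hm : m = (rowB tasks 0).length) (hm1 : 1 ≤ m)
    (hrows : ∀ row ∈ tasks, m ≤ row.length) :
    ∀ (l : List Int) (result : List Int) (reps : Int),
    (∀ j ∈ l, 0 ≤ j ∧ j < tasks.length) → (∀ j ∈ result, 0 ≤ j ∧ j < tasks.length) →
    l.foldl (stepA tasks) (result, reps)
      = (l.foldl (stepBd tasks m) result, reps + (repsFun result.length l.length : Int))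
    ∧ (∀ j ∈ l.foldl (stepBd tasks m) result, 0 ≤ j ∧ j < tasks.length) := by
  intro l
  induction l with
  | nil =>
    intro result reps _ hres
    exact ⟨by simp [repsFun], hres⟩
  | cons x xs ih =>
    intro result reps hl hres
    have hx := hl x (List.mem_cons_self ..)
    have hxs : ∀ j ∈ xs, 0 ≤ j ∧ j < (tasks.length : Int) :=
      fun j hj => hl j (List.mem_cons_of_mem _ hj)
    have hsel := selEq
      (fun pos => CmaxA (PySem.List.slice result none (some pos) ++ [x] ++
        PySem.List.slice result (some pos) none) tasks)
      (fun pos => PySem.List.pyGetD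
        ((PySem.List.slice result (some pos) none).foldl
          (fun c job => advanceB c (rowB tasks job))
          (advanceB (PySem.List.pyGetD
            (result.foldl (fun sts job => sts ++ [advanceB (PySem.List.pyGetD sts (-1) []) (rowB tasks job)])
              [List.replicate m (0 : Int)]) pos []) (rowB tasks x))) (-1) 0)
      (PySem.List.pyRange 0 ((result.length : Int) + 1) 1)
      (fun p hp => by
        have hb := PySem.List.mem_pyRange_one.mp hp
        exact candEq tasks m hm hm1 hrows result x hres hx p hb.1 (by omega))
      0 none reps
    have hbnd := selP
      (fun pos => PySem.List.pyGetD
        ((PySem.List.slice result (some pos) none).foldl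
          (fun c job => advanceB c (rowB tasks job))
          (advanceB (PySem.List.pyGetD
            (result.foldl (fun sts job => sts ++ [advanceB (PySem.List.pyGetD sts (-1) []) (rowB tasks job)])
              [List.replicate m (0 : Int)]) pos []) (rowB tasks x))) (-1) 0)
      (fun q => 0 ≤ q ∧ q ≤ (result.length : Int))
      (PySem.List.pyRange 0 ((result.length : Int) + 1) 1)
      0 none ⟨le_refl 0, by positivity⟩
      (fun p hp => by
        have hb := PySem.List.mem_pyRange_one.mp hp
        exact ⟨hb.1, by omega⟩)
    dsimp only at hsel hbnd
    have hins : PySem.List.insert result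
        ((PySem.List.pyRange 0 ((result.length : Int) + 1) 1).foldl
          (fun (s : Int × Option Int) pos =>
            let v := PySem.List.pyGetD
              ((PySem.List.slice result (some pos) none).foldl
                (fun c job => advanceB c (rowB tasks job))
                (advanceB (PySem.List.pyGetD
                  (result.foldl (fun sts job => sts ++ [advanceB (PySem.List.pyGetD sts (-1) []) (rowB tasks job)])
                    [List.replicate m (0 : Int)]) pos []) (rowB tasks x))) (-1) 0
            match s.2 with
            | none => (pos, some v)
            | some b => if v < b then (pos, some v) else s)
          (0, none)).1 x
        = result.take ((PySem.List.pyRange 0 ((result.length : Int) + 1) 1).foldl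
          (fun (s : Int × Option Int) pos =>
            let v := PySem.List.pyGetD
              ((PySem.List.slice result (some pos) none).foldl
                (fun c job => advanceB c (rowB tasks job))
                (advanceB (PySem.List.pyGetD
                  (result.foldl (fun sts job => sts ++ [advanceB (PySem.List.pyGetD sts (-1) []) (rowB tasks job)])
                    [List.replicate m (0 : Int)]) pos []) (rowB tasks x))) (-1) 0
            match s.2 with
            | none => (pos, some v)
            | some b => if v < b then (pos, some v) else s)
          (0, none)).1.toNat
          ++ x :: result.drop ((PySem.List.pyRange 0 ((result.length : Int) + 1) 1).foldl
          (fun (s : Int × Option Int) pos =>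
            let v := PySem.List.pyGetD
              ((PySem.List.slice result (some pos) none).foldl
                (fun c job => advanceB c (rowB tasks job))
                (advanceB (PySem.List.pyGetD
                  (result.foldl (fun sts job => sts ++ [advanceB (PySem.List.pyGetD sts (-1) []) (rowB tasks job)])
                    [List.replicate m (0 : Int)]) pos []) (rowB tasks x))) (-1) 0
            match s.2 with
            | none => (pos, some v)
            | some b => if v < b then (pos, some v) else s)
          (0, none)).1.toNat := by
      conv_lhs => rw [← Int.toNat_of_nonneg hbnd.1]
      rw [PySem.List.insert_natCast _ _ _ (by omega)]
    dsimp only at hins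
    have hstep : stepA tasks (result, reps) x
        = (stepBd tasks m result x, reps + ((result.length : Int) + 1)) := by
      unfold stepA stepBd
      dsimp only
      rw [hsel]
      dsimp only
      rw [PySem.List.slice_to result hbnd.1, PySem.List.slice_from result hbnd.1, hins]
      simp only [Prod.mk.injEq]
      refine ⟨by simp, ?_⟩
      rw [PySem.List.length_pyRange_one]
      omega
    have hresv' : ∀ j ∈ stepBd tasks m result x, 0 ≤ j ∧ j < (tasks.length : Int) := by
      intro j hj
      unfold stepBd at hj
      dsimp only at hj
      rw [hins] at hj
      simp only [List.mem_append, List.mem_cons] at hj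
      rcases hj with hj | hj | hj
      · exact hres j (List.take_subset _ _ hj)
      · exact hj ▸ hx
      · exact hres j (List.drop_subset _ _ hj)
    have hlen2 : (stepBd tasks m result x).length = result.length + 1 := by
      unfold stepBd
      dsimp only
      exact PySem.List.length_insert ..
    obtain ⟨h1, h2⟩ := ih (stepBd tasks m result x) (reps + ((result.length : Int) + 1)) hxs hresv'
    refine ⟨?_, by simpa only [List.foldl_cons] using h2⟩
    simp only [List.foldl_cons]
    rw [hstep, h1, hlen2]
    simp only [Prod.mk.injEq, List.length_cons]
    refine ⟨trivial, ?_⟩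
    rw [show repsFun result.length (xs.length + 1)
      = (result.length + 1) + repsFun (result.length + 1) xs.length from rfl]
    push_cast
    ring

lemma reps_closed (n : Nat) : ((repsFun 0 n : Nat) : Int)
    = PySem.Int.floordiv ((n : Int) * ((n : Int) + 1)) 2 := by
  rw [PySem.Int.floordiv_eq_ediv_of_pos (by norm_num)]
  have h := repsFun_gauss n 0
  simp only [mul_zero, zero_add] at h
  have h2 : ((n : Int) * ((n : Int) + 1)) = 2 * ((repsFun 0 n : Nat) : Int) := by
    exact_mod_cast congrArg (fun t : Nat => (t : Int)) h.symm
  rw [h2, Int.mul_ediv_cancel_left _ (by norm_num)]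

theorem jackson_spec : Claim_equal_jackson := by
  intro tasks _ hpre
  obtain ⟨hne, hrow⟩ := hpre
  show jackson tasks = jackson_alt tasks
  have hhead : rowB tasks 0 = tasks.headD [] := by
    cases tasks with
    | nil => rfl
    | cons a l =>
      show PySem.List.pyGetD (a :: l) 0 [] = a
      exact PySem.List.pyGetD_zero_cons ..
  set m : Nat := (rowB tasks 0).length with hm
  have hmem0 : tasks.headD [] ∈ tasks := by
    cases tasks with
    | nil => exact absurd rfl hne
    | cons a l => exact List.mem_cons_self ..
  have hm1 : 1 ≤ m := by
    rw [hm, hhead]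
    exact List.length_pos_iff.mpr (hrow _ hmem0).1
  have hrows : ∀ row ∈ tasks, m ≤ row.length := by
    intro row h
    rw [hm, hhead]
    exact (hrow row h).2
  set order := PySem.List.sorted (PySem.List.pyRange 0 (tasks.length : Int) 1)
    (fun x => PySem.List.pyGetD (rowB tasks x) 0 0) false with horder
  have hl : ∀ j ∈ order, 0 ≤ j ∧ j < (tasks.length : Int) := by
    intro j hj
    rw [horder] at hj
    exact PySem.List.mem_pyRange_one.mp ((PySem.List.mem_sorted _ _ _ _).mp hj)
  obtain ⟨h1, h2⟩ := mainLoop tasks m hm hm1 hrows order [] 0 hl (by simp)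
  have hAeq : jackson tasks
      = (CmaxA (order.foldl (stepA tasks) ([], 0)).1 tasks,
         (order.foldl (stepA tasks) ([], 0)).2) := rfl
  have hBeq : jackson_alt tasks
      = (PySem.List.pyGetD ((order.foldl (stepBd tasks m) []).foldl
           (fun c job => advanceB c (rowB tasks job)) (List.replicate m (0 : Int))) (-1) 0,
         PySem.Int.floordiv ((tasks.length : Int) * ((tasks.length : Int) + 1)) 2) := rfl
  rw [hAeq, hBeq, h1]
  have hord_len : order.length = tasks.length := by
    rw [horder, PySem.List.length_sorted, PySem.List.length_pyRange_one]
    omega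
  simp only [Prod.mk.injEq]
  constructor
  · exact finalEq tasks m hm hm1 hrows _ h2
  · rw [hord_len, List.length_nil, zero_add, reps_closed]
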